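-- pv_equiv track=rewrite | github.com/ffrfffff/raster-visualization-plugin | src/utils/pb_instruction.py | _parse_bit_mask
-- ===== SOURCE A (Python) =====
-- from typing import List, Optional, Sequence, Tuple
--
-- def _parse_bit_mask(mask_words: Sequence[int], primitive_count: int) -> Tuple[int, ...]:
--     indices = []
--     for primitive in range(primitive_count):
--         word_index = primitive // 32
--         bit = primitive % 32
--         if word_index < len(mask_words) and mask_words[word_index] & (1 << bit):
--             indices.append(primitive)
--     return tuple(indices)
-- ===== SOURCE B (Python) =====
-- def _parse_bit_mask(mask_words, primitive_count):
--     indices = []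
--     base = 0
--     for word in mask_words:
--         if base >= primitive_count:
--             break
--         bits = word & 0xFFFFFFFF
--         offset = 0
--         while bits:
--             if bits & 1:
--                 p = base + offset
--                 if p >= primitive_count:
--                     break
--                 indices.append(p)
--             bits >>= 1
--             offset += 1
--         base += 32
--     return tuple(indices)
-- ===== Notes on version B (the rewrite author's own statement) =====
-- stated objective: faster
-- what changed: B replaces A's scan over every primitive index (one floordiv/mod/shift per primitive) by a word-major loop that masks each word to 32 bits and walks only up to its highest set bit by shifting, skipping zero words and stopping as soon as the word base reaches primitive_count.
import Mathlib
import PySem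

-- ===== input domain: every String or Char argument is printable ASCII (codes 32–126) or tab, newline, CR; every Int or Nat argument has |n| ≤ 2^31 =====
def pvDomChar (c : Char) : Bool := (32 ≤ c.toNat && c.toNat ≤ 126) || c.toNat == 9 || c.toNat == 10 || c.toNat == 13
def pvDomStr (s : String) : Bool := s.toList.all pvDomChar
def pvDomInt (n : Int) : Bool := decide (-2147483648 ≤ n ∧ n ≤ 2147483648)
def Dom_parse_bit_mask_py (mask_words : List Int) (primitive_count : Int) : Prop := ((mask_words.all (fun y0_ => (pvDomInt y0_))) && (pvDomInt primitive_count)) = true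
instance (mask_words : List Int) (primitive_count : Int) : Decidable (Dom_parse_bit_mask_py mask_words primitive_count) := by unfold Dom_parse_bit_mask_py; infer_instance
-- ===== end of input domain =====

-- B replaces A's per-primitive scan by a word-major loop that masks each word to 32 bits and
-- walks its bits by shifting, skipping zero words and stopping early at primitive_count (objective: faster).

-- ===== PORT A =====
-- literal port of A: for primitive in range(primitive_count): … if wi < len and mask_words[wi] & (1 << bit): append
-- (mask_words[word_index] is ported with pyGetD; the default is unreachable because the guard word_index < len
--  is checked first and word_index ≥ 0 on every primitive the range produces)
def parse_bit_mask_py (mask_words : List Int) (primitive_count : Int) : List Int :=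
  (PySem.List.pyRange 0 primitive_count 1).foldl (fun indices primitive =>
    let word_index := PySem.Int.floordiv primitive 32
    let bit := PySem.Int.mod primitive 32
    if word_index < (mask_words.length : Int) ∧
        PySem.Int.band (PySem.List.pyGetD mask_words word_index 0) ((1 : Int) <<< bit.toNat) ≠ 0 then
      indices ++ [primitive]
    else indices) []

-- ===== PORT B =====
-- inner while loop of Source B: 'while bits: if bits & 1: …; bits >>= 1; offset += 1'
-- (bits = word & 0xFFFFFFFF is a nonnegative Python int, so it is carried as a Nat)
def pvBitsLoop (pc base : Int) (offset : Nat) (bits : Nat) : List Int :=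
  if bits = 0 then []
  else if bits &&& 1 ≠ 0 then
    if pc ≤ base + (offset : Int) then []
    else (base + (offset : Int)) :: pvBitsLoop pc base (offset + 1) (bits >>> 1)
  else pvBitsLoop pc base (offset + 1) (bits >>> 1)
termination_by bits
decreasing_by all_goals (rw [Nat.shiftRight_one]; omega)

-- outer for loop of Source B over the words, carrying base; 'if base >= primitive_count: break'
def pvWordsLoop (pc : Int) (base : Int) (ws : List Int) : List Int :=
  match ws with
  | [] => []
  | w :: rest =>
    if pc ≤ base then []
    else pvBitsLoop pc base 0 ((PySem.Int.band w 4294967295).toNat) ++ pvWordsLoop pc (base + 32) rest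

def parse_bit_mask_py_alt (mask_words : List Int) (primitive_count : Int) : List Int :=
  pvWordsLoop primitive_count 0 mask_words

-- ===== PRECONDITION & SPEC =====
def Spec_parse_bit_mask_py (mask_words : List Int) (primitive_count : Int) (out : List Int) : Prop := out = parse_bit_mask_py_alt mask_words primitive_count
instance (mask_words : List Int) (primitive_count : Int) (out : List Int) : Decidable (Spec_parse_bit_mask_py mask_words primitive_count out) := by unfold Spec_parse_bit_mask_py; infer_instance

-- ===== CLAIM (what is proved, stated in full; the proofs are below) =====
def Claim_equal_parse_bit_mask_py : Prop := ∀ (mask_words : List Int) (primitive_count : Int), Dom_parse_bit_mask_py mask_words primitive_count → Spec_parse_bit_mask_py mask_words primitive_count (parse_bit_mask_py mask_words primitive_count)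

-- ===== LEMMAS AND PROOFS =====

-- the 32-bit truncation of a word is < 2^32
lemma pvBits_lt (w : Int) : (PySem.Int.band w 4294967295).toNat < 2 ^ 32 := by
  have hM : (4294967295 : Int).toNat = 2 ^ 32 - 1 := by decide
  unfold PySem.Int.band
  split_ifs with h1 h2 h3
  · rw [Int.toNat_natCast, hM, Nat.and_two_pow_sub_one_eq_mod]
    exact Nat.mod_lt _ (by norm_num)
  · omega
  · rw [Int.toNat_natCast, hM]
    omega
  · omega

-- bit j (j < 32) of the truncated word is exactly Python's test  w & (1 << j) != 0
lemma pvKeyBit (w : Int) (j : Nat) (hj : j < 32) :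
    ((PySem.Int.band w 4294967295).toNat).testBit j
      = decide (PySem.Int.band w ((1 : Int) <<< j) ≠ 0) := by
  have hsh : ((1 : Int) <<< j) = ((2 ^ j : Nat) : Int) := by
    have h1 : ((1 : Nat) : Int) = (1 : Int) := by norm_num
    rw [← h1, ← Int.natCast_shiftLeft]
    norm_num [Nat.shiftLeft_eq]
  have hM : (4294967295 : Int).toNat = 2 ^ 32 - 1 := by decide
  have h2j : ((2 ^ j : Nat) : Int).toNat = 2 ^ j := Int.toNat_natCast _
  have h2jpos : (0 : Int) ≤ ((2 ^ j : Nat) : Int) := by positivity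
  rcases le_or_gt 0 w with hw | hw
  · -- w ≥ 0
    unfold PySem.Int.band
    rw [if_pos hw, if_pos (by norm_num), if_pos hw, if_pos (by rw [hsh]; exact h2jpos)]
    rw [hsh, hM, h2j, Int.toNat_natCast]
    rw [Nat.and_two_pow_sub_one_eq_mod, Nat.testBit_mod_two_pow]
    rw [Nat.and_two_pow]
    rcases Bool.eq_false_or_eq_true (w.toNat.testBit j) with hb | hb <;>
      simp [hb, hj]
  · -- w < 0
    unfold PySem.Int.band
    rw [if_neg (by omega), if_pos (by norm_num), if_neg (by omega), if_pos (by rw [hsh]; exact h2jpos)]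
    rw [hsh]
    set a := (-w - 1).toNat with ha
    rw [hM, h2j, Int.toNat_natCast]
    have hcomm : 2 ^ 32 - 1 &&& a = a &&& (2 ^ 32 - 1) := Nat.and_comm _ _
    rw [hcomm, Nat.and_two_pow_sub_one_eq_mod]
    have hlt : a % 2 ^ 32 < 2 ^ 32 := Nat.mod_lt _ (by norm_num)
    have hsub : 2 ^ 32 - 1 - a % 2 ^ 32 = 2 ^ 32 - (a % 2 ^ 32 + 1) := by omega
    rw [hsub, Nat.testBit_two_pow_sub_succ hlt, Nat.testBit_mod_two_pow]
    have hc2 : 2 ^ j &&& a = a &&& 2 ^ j := Nat.and_comm _ _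
    rw [hc2, Nat.and_two_pow]
    rcases Bool.eq_false_or_eq_true (a.testBit j) with hb | hb <;>
      simp [hb, hj]

-- the inner while loop is a filter of the remaining range by the bits of `bits`
lemma pvBitsLoop_eq (pc base : Int) (bits : Nat) : ∀ offset : Nat,
    pvBitsLoop pc base offset bits
      = (PySem.List.pyRange (base + (offset : Int)) pc 1).filter
          (fun p => bits.testBit (p - (base + (offset : Int))).toNat) := by
  induction bits using Nat.strong_induction_on with
  | _ bits IH =>
    intro offset
    rw [pvBitsLoop]
    by_cases h0 : bits = 0
    · subst h0; simp
    · have hlt : bits >>> 1 < bits := by rw [Nat.shiftRight_one]; omega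
      have htail : base + (offset : Int) < pc →
          (PySem.List.pyRange (base + (offset : Int) + 1) pc 1).filter
              (fun p => (bits >>> 1).testBit (p - (base + (offset : Int) + 1)).toNat)
            = (PySem.List.pyRange (base + (offset : Int) + 1) pc 1).filter
              (fun p => bits.testBit (p - (base + (offset : Int))).toNat) := by
        intro h
        apply List.filter_congr
        intro p hp
        have hmem := PySem.List.mem_pyRange_one.mp hp
        rw [Nat.testBit_shiftRight]
        congr 1
        omega
      by_cases h1 : bits &&& 1 ≠ 0
      · rw [if_neg h0, if_pos h1]
        have hbit0 : bits.testBit 0 = true := by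
          rw [Nat.testBit_zero]
          have := Nat.and_one_is_mod bits
          simp only [decide_eq_true_eq]
          omega
        by_cases hend : pc ≤ base + (offset : Int)
        · rw [if_pos hend, PySem.List.pyRange_one_eq_nil hend]
          simp
        · rw [if_neg hend]
          rw [PySem.List.pyRange_one_cons (by omega)]
          rw [List.filter_cons]
          have hhead : bits.testBit (base + (offset : Int) - (base + (offset : Int))).toNat = true := by
            simpa using hbit0
          rw [hhead, if_pos rfl]
          congr 1
          rw [IH _ hlt (offset + 1)]
          push_cast
          rw [← add_assoc]
          exact htail (by omega)
      · rw [if_neg h0, if_neg h1]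
        have hbit0 : bits.testBit 0 = false := by
          rw [Nat.testBit_zero]
          have := Nat.and_one_is_mod bits
          simp only [decide_eq_false_iff_not]
          omega
        rw [IH _ hlt (offset + 1)]
        push_cast
        rw [← add_assoc]
        by_cases hend : pc ≤ base + (offset : Int)
        · rw [PySem.List.pyRange_one_eq_nil hend, PySem.List.pyRange_one_eq_nil (by omega)]
          simp
        · rw [PySem.List.pyRange_one_cons (by omega : base + (offset : Int) < pc)]
          rw [List.filter_cons]
          have hhead : bits.testBit (base + (offset : Int) - (base + (offset : Int))).toNat = false := by
            simpa using hbit0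
          rw [hhead]
          simp only [Bool.false_eq_true, if_false]
          exact htail (by omega)

-- indexing a cons cell at a positive python index
lemma pvGetD_cons_pos {w : Int} {rest : List Int} {i : Int} (d : Int) (hi : 1 ≤ i) :
    PySem.List.pyGetD (w :: rest) i d = PySem.List.pyGetD rest (i - 1) d := by
  obtain ⟨j, hj⟩ : ∃ j : Nat, i = (j : Int) + 1 := ⟨(i - 1).toNat, by omega⟩
  subst hj
  have h1 : ((j : Int) + 1) = ((j + 1 : Nat) : Int) := by push_cast; ring
  rw [h1, PySem.List.pyGetD_natCast]
  have h2 : ((j + 1 : Nat) : Int) - 1 = ((j : Nat) : Int) := by push_cast; ring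
  rw [h2, PySem.List.pyGetD_natCast]
  simp [List.getD]

-- the word-major loop equals A's filter over the remaining range
lemma pvWordsLoop_eq (ws : List Int) : ∀ (k : Nat) (pc : Int),
    pvWordsLoop pc (32 * (k : Int)) ws
      = (PySem.List.pyRange (32 * (k : Int)) pc 1).filter
          (fun p => decide (PySem.Int.floordiv p 32 < (k : Int) + ws.length ∧
            PySem.Int.band (PySem.List.pyGetD ws (PySem.Int.floordiv p 32 - (k : Int)) 0)
              ((1 : Int) <<< (PySem.Int.mod p 32).toNat) ≠ 0)) := by
  induction ws with
  | nil =>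
    intro k pc
    unfold pvWordsLoop
    symm
    rw [List.filter_eq_nil_iff]
    intro p hp
    have hmem := PySem.List.mem_pyRange_one.mp hp
    have hk : (k : Int) ≤ PySem.Int.floordiv p 32 :=
      (PySem.Int.le_floordiv_iff_mul_le (by norm_num)).mpr (by omega)
    simp only [List.length_nil, Nat.cast_zero, add_zero, decide_eq_true_eq, not_and]
    omega
  | cons w rest IH =>
    intro k pc
    unfold pvWordsLoop
    by_cases hstop : pc ≤ 32 * (k : Int)
    · rw [if_pos hstop, PySem.List.pyRange_one_eq_nil hstop]
      simp
    · rw [if_neg hstop]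
      set m : Int := min (32 * (k : Int) + 32) pc with hm
      rw [PySem.List.pyRange_one_append (32 * (k : Int)) m pc (by omega) (by omega),
          List.filter_append]
      congr 1
      · -- first 32 slots come from the inner bit loop on w
        have hinner := pvBitsLoop_eq pc (32 * (k : Int)) ((PySem.Int.band w 4294967295).toNat) 0
        simp only [Nat.cast_zero, add_zero] at hinner
        rw [hinner]
        rw [PySem.List.pyRange_one_append (32 * (k : Int)) m pc (by omega) (by omega),
            List.filter_append]
        have hsecond : (PySem.List.pyRange m pc 1).filter
            (fun p => ((PySem.Int.band w 4294967295).toNat).testBit (p - 32 * (k : Int)).toNat) = [] := by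
          rw [List.filter_eq_nil_iff]
          intro p hp
          have hmem := PySem.List.mem_pyRange_one.mp hp
          have h32 : 32 ≤ (p - 32 * (k : Int)).toNat := by omega
          have : (PySem.Int.band w 4294967295).toNat < 2 ^ (p - 32 * (k : Int)).toNat :=
            lt_of_lt_of_le (pvBits_lt w) (Nat.pow_le_pow_right (by norm_num) h32)
          simp [Nat.testBit_lt_two_pow this]
        rw [hsecond, List.append_nil]
        apply List.filter_congr
        intro p hp
        have hmem := PySem.List.mem_pyRange_one.mp hp
        have hplt : p < 32 * (k : Int) + 32 := by omega
        have hfd : PySem.Int.floordiv p 32 = (k : Int) :=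
          (PySem.Int.floordiv_eq_iff_of_pos (by norm_num)).mpr (by constructor <;> omega)
        have hmod : PySem.Int.mod p 32 = p - 32 * (k : Int) := by
          rw [PySem.Int.mod_eq_emod_of_pos (by norm_num)]
          omega
        have hjlt : (p - 32 * (k : Int)).toNat < 32 := by omega
        rw [pvKeyBit w _ hjlt]
        rw [hmod, hfd]
        simp [PySem.List.pyGetD_zero_cons]
      · -- remaining words via the induction hypothesis at k+1
        have IH1 := IH (k + 1) pc
        have hcast : 32 * ((k : Int) + 1) = 32 * (k : Int) + 32 := by ring
        push_cast at IH1
        rw [hcast] at IH1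
        rw [IH1]
        by_cases hend : pc ≤ 32 * (k : Int) + 32
        · have hmeq : m = pc := by omega
          rw [hmeq, PySem.List.pyRange_one_eq_nil (le_refl pc),
              PySem.List.pyRange_one_eq_nil hend]
          simp
        · have hmeq : m = 32 * (k : Int) + 32 := by omega
          rw [hmeq]
          apply List.filter_congr
          intro p hp
          have hmem := PySem.List.mem_pyRange_one.mp hp
          have hk1 : (k : Int) + 1 ≤ PySem.Int.floordiv p 32 :=
            (PySem.Int.le_floordiv_iff_mul_le (by norm_num)).mpr (by omega)
          have hget : PySem.List.pyGetD (w :: rest) (PySem.Int.floordiv p 32 - (k : Int)) 0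
              = PySem.List.pyGetD rest (PySem.Int.floordiv p 32 - ((k : Int) + 1)) 0 := by
            rw [pvGetD_cons_pos 0 (by omega)]
            congr 1
            ring
          rw [hget]
          simp only [List.length_cons, decide_eq_decide]
          constructor
          · rintro ⟨hlen, hb⟩
            exact ⟨by push_cast at hlen ⊢; omega, hb⟩
          · rintro ⟨hlen, hb⟩
            exact ⟨by push_cast at hlen ⊢; omega, hb⟩

-- ===== VERDICT (by name: the statement is the Claim_ definition above) =====
theorem parse_bit_mask_py_spec : Claim_equal_parse_bit_mask_py := by
  intro mask_words primitive_count _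
  unfold Spec_parse_bit_mask_py parse_bit_mask_py parse_bit_mask_py_alt
  rw [PySem.List.foldl_append_ite_eq_filter
        (fun primitive => PySem.Int.floordiv primitive 32 < (mask_words.length : Int) ∧
          PySem.Int.band (PySem.List.pyGetD mask_words (PySem.Int.floordiv primitive 32) 0)
            ((1 : Int) <<< (PySem.Int.mod primitive 32).toNat) ≠ 0)]
  have h := pvWordsLoop_eq mask_words 0 primitive_count
  simp only [Nat.cast_zero, mul_zero, zero_add, sub_zero] at h
  rw [h]
  rfl
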